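-- pv_equiv track=rewrite | github.com/Lingzhi-WANG/CTA-CRS | fairseq/models/bart/convrec_time_model.py | _edge_list
-- ===== SOURCE A (Python) =====
-- from collections import defaultdict, OrderedDict
--
-- def _edge_list(kg, n_entity, hop=2, cnt_threshold=1000):
--     edge_list = []
--     for h in range(hop):
--         for entity in range(n_entity):
--             edge_list.append((entity, entity, 185))
--             if entity not in kg:
--                 continue
--             for tail_and_relation in kg[entity]:
--                 if entity != tail_and_relation[1] and tail_and_relation[0] != 185:
--                     edge_list.append((entity, tail_and_relation[1], tail_and_relation[0]))
--                     edge_list.append((tail_and_relation[1], entity, tail_and_relation[0]))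
--
--     relation_cnt = defaultdict(int)
--     relation_idx = {}
--     for h, t, r in edge_list:
--         relation_cnt[r] += 1
--     for h, t, r in edge_list:
--         if relation_cnt[r] > cnt_threshold and r not in relation_idx:
--             relation_idx[r] = len(relation_idx)
--     return [(h, t, relation_idx[r]) for h, t, r in edge_list if relation_cnt[r] > cnt_threshold], len(relation_idx)
-- ===== SOURCE B (Python) =====
-- def _edge_list(kg, n_entity, hop=2, cnt_threshold=1000):
--     # Relation-centric: never materialise the unfiltered edge list. Count each
--     # relation directly from kg (a qualifying kg edge contributes 2 per hop, the
--     # self-loop relation 185 contributes n_entity per hop), decide admission per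
--     # relation via hop-scaled counts, then emit already-reindexed edges directly.
--     if hop <= 0 or n_entity <= 0:
--         return [], 0
--     cnt = {185: n_entity}
--     order = [185]
--     for e in range(n_entity):
--         for r, t in kg.get(e, ()):
--             if e != t and r != 185:
--                 if r in cnt:
--                     cnt[r] += 2
--                 else:
--                     cnt[r] = 2
--                     order.append(r)
--     idx = {}
--     for r in order:
--         if hop * cnt[r] > cnt_threshold:
--             idx[r] = len(idx)
--     out = []
--     for e in range(n_entity):
--         i185 = idx.get(185)
--         if i185 is not None:
--             out.append((e, e, i185))
--         for r, t in kg.get(e, ()):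
--             if e != t and r != 185:
--                 i = idx.get(r)
--                 if i is not None:
--                     out.append((e, t, i))
--                     out.append((t, e, i))
--     return out * hop, len(idx)
-- ===== Notes on version B (the rewrite author's own statement) =====
-- stated objective: alternative
-- what changed: B is relation-centric and never materialises the unfiltered edge list: it tallies each relation's per-hop count directly from kg (2 per qualifying kg edge, n_entity for the self-loop relation 185) while recording first-appearance order, decides admission per relation with the hop-scaled count, and then emits the already-reindexed filtered edges straight from kg, repeating the per-hop block hop times.
import Mathlib
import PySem

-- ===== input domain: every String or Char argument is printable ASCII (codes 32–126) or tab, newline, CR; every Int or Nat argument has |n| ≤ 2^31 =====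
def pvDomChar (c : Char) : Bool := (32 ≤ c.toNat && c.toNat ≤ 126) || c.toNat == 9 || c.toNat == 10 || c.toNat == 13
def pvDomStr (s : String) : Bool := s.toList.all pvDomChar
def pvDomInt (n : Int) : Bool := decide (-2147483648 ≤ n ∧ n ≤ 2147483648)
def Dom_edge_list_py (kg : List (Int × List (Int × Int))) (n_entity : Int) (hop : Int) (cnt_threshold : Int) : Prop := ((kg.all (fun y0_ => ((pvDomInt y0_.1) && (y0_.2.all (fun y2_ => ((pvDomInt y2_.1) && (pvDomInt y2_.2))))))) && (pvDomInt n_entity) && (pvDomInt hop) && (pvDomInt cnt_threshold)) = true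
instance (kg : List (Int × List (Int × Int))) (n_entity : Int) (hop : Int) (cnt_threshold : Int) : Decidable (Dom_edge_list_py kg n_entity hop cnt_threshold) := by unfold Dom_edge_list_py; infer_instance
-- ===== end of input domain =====

-- B is relation-centric: it never materialises the unfiltered edge list, tallying
-- relation counts and first-appearance order directly from kg and then emitting the
-- already-reindexed filtered edges straight from kg (objective: alternative).

-- ===== PORT A =====
def edge_list_py (kg : List (Int × List (Int × Int))) (n_entity : Int) (hop : Int) (cnt_threshold : Int) : (List (Int × Int × Int)) × Int :=
  let d := PySem.Dict.mk kg
  let el : List (Int × Int × Int) :=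
    (PySem.List.pyRange 0 hop 1).foldl (fun acc _h =>
      (PySem.List.pyRange 0 n_entity 1).foldl (fun acc e =>
        let acc := acc ++ [(e, e, 185)]
        match d.get? e with          -- 'if entity not in kg: continue' + 'kg[entity]'
        | none => acc
        | some lst =>
          lst.foldl (fun acc tr =>
            if e ≠ tr.2 ∧ tr.1 ≠ 185 then
              acc ++ [(e, tr.2, tr.1), (tr.2, e, tr.1)]
            else acc) acc) acc) []
  -- relation_cnt[r] += 1 on a defaultdict(int)
  let cnt : PySem.Dict Int Int :=
    el.foldl (fun c p => c.modify p.2.2 0 (· + 1)) PySem.Dict.empty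
  let idx : PySem.Dict Int Int :=
    el.foldl (fun ix p =>
      if cnt.getD p.2.2 0 > cnt_threshold ∧ ¬ ix.contains p.2.2 then
        ix.insert p.2.2 (ix.size : Int)
      else ix) PySem.Dict.empty
  -- relation_idx[r] in the comprehension: the key is always present there (r passed the
  -- same count test that inserted it), so get?.getD 0 is exact — no KeyError is reachable.
  (el.filterMap (fun p =>
      if cnt.getD p.2.2 0 > cnt_threshold then
        some (p.1, p.2.1, (idx.get? p.2.2).getD 0)
      else none),
   (idx.size : Int))

-- ===== PORT B =====
def edge_list_py_alt (kg : List (Int × List (Int × Int))) (n_entity : Int) (hop : Int) (cnt_threshold : Int) : (List (Int × Int × Int)) × Int :=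
  if hop ≤ 0 ∨ n_entity ≤ 0 then ([], 0) else
  let g := PySem.Dict.mk kg
  -- cnt, order: per-hop relation tallies straight from kg (2 per qualifying edge;
  -- the self-loop relation 185 occurs n_entity times per hop), first-appearance order
  let s :=
    (PySem.List.pyRange 0 n_entity 1).foldl (fun (s : PySem.Dict Int Int × List Int) e =>
      (g.getD e []).foldl (fun s rt =>
        if e ≠ rt.2 ∧ rt.1 ≠ 185 then
          if s.1.contains rt.1 then (s.1.modify rt.1 0 (· + 2), s.2)
          else (s.1.insert rt.1 2, s.2 ++ [rt.1])
        else s) s)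
      ((PySem.Dict.empty.insert 185 n_entity), [185])
  let cnt := s.1
  let idx : PySem.Dict Int Int :=
    s.2.foldl (fun ix r =>
      if hop * cnt.getD r 0 > cnt_threshold then ix.insert r (ix.size : Int) else ix)
      PySem.Dict.empty
  -- emit the already-reindexed filtered edges directly from kg  ('idx.get(r)')
  let out :=
    (PySem.List.pyRange 0 n_entity 1).foldl (fun acc e =>
      let acc := match idx.get? 185 with
        | some i => acc ++ [(e, e, i)]
        | none => acc
      (g.getD e []).foldl (fun acc rt =>
        if e ≠ rt.2 ∧ rt.1 ≠ 185 then
          match idx.get? rt.1 with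
          | some i => acc ++ [(e, rt.2, i), (rt.2, e, i)]
          | none => acc
        else acc) acc) []
  (PySem.List.pyRepeat out hop, (idx.size : Int))

-- ===== PRECONDITION & SPEC =====
def Spec_edge_list_py (kg : List (Int × List (Int × Int))) (n_entity : Int) (hop : Int) (cnt_threshold : Int) (out : (List (Int × Int × Int)) × Int) : Prop := out = edge_list_py_alt kg n_entity hop cnt_threshold
instance (kg : List (Int × List (Int × Int))) (n_entity : Int) (hop : Int) (cnt_threshold : Int) (out : (List (Int × Int × Int)) × Int) : Decidable (Spec_edge_list_py kg n_entity hop cnt_threshold out) := by unfold Spec_edge_list_py; infer_instance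

-- ===== CLAIM (what is proved, stated in full; the proofs are below) =====
def Claim_equal_edge_list_py : Prop := ∀ (kg : List (Int × List (Int × Int))) (n_entity : Int) (hop : Int) (cnt_threshold : Int), Dom_edge_list_py kg n_entity hop cnt_threshold → Spec_edge_list_py kg n_entity hop cnt_threshold (edge_list_py kg n_entity hop cnt_threshold)

-- ===== LEMMAS AND PROOFS =====

-- the edges one entity contributes (per hop)
def pvSeg (kg : List (Int × List (Int × Int))) (e : Int) : List (Int × Int × Int) :=
  (e, e, 185) :: ((PySem.Dict.mk kg).getD e []).flatMap (fun rt =>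
    if e ≠ rt.2 ∧ rt.1 ≠ 185 then [(e, rt.2, rt.1), (rt.2, e, rt.1)] else [])

-- the edge list one hop produces
def pvBase (kg : List (Int × List (Int × Int))) (n_entity : Int) : List (Int × Int × Int) :=
  (PySem.List.pyRange 0 n_entity 1).flatMap (pvSeg kg)

-- the (doubled) qualifying kg-edge relations of one entity, and of all entities
def pvSegER (kg : List (Int × List (Int × Int))) (e : Int) : List Int :=
  ((PySem.Dict.mk kg).getD e []).flatMap (fun rt =>
    if e ≠ rt.2 ∧ rt.1 ≠ 185 then [rt.1, rt.1] else [])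

def pvER (kg : List (Int × List (Int × Int))) (n_entity : Int) : List Int :=
  (PySem.List.pyRange 0 n_entity 1).flatMap (pvSegER kg)

-- the relation_idx-building fold of A, abstracted over the admission condition c
def pvIdxF (c : Int → Prop) [DecidablePred c] (l : List (Int × Int × Int))
    (d : PySem.Dict Int Int) : PySem.Dict Int Int :=
  l.foldl (fun ix p =>
    if c p.2.2 ∧ ¬ ix.contains p.2.2 then ix.insert p.2.2 (ix.size : Int) else ix) d

-- the same fold over a plain relation list
def pvIns (c : Int → Prop) [DecidablePred c] (l : List Int)
    (d : PySem.Dict Int Int) : PySem.Dict Int Int :=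
  l.foldl (fun ix r =>
    if c r ∧ ¬ ix.contains r then ix.insert r (ix.size : Int) else ix) d

-- first occurrences of l that are not in seen
def pvNew (seen : List Int) : List Int → List Int
  | [] => []
  | r :: t => if r ∈ seen then pvNew seen t else r :: pvNew (r :: seen) t

-- the filtered, reindexed list w.r.t. a final index dictionary D
def pvFilt (c : Int → Prop) [DecidablePred c] (D : PySem.Dict Int Int)
    (l : List (Int × Int × Int)) : List (Int × Int × Int) :=
  l.filterMap (fun p =>
    if c p.2.2 then some (p.1, p.2.1, (D.get? p.2.2).getD 0) else none)

theorem pvInnerB (kg : List (Int × List (Int × Int))) (e : Int)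
    (acc : List (Int × Int × Int)) :
    ((PySem.Dict.mk kg).getD e []).foldl (fun a rt =>
        if e ≠ rt.2 ∧ rt.1 ≠ 185 then a ++ [(e, rt.2, rt.1), (rt.2, e, rt.1)] else a)
      (acc ++ [(e, e, 185)]) = acc ++ pvSeg kg e := by
  rw [PySem.List.foldl_congr_mem _ _
      (fun a rt => a ++ (if e ≠ rt.2 ∧ rt.1 ≠ 185 then [(e, rt.2, rt.1), (rt.2, e, rt.1)] else []))
      _ (by intro a rt _; by_cases hct : e ≠ rt.2 ∧ rt.1 ≠ 185 <;> simp [hct])]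
  rw [PySem.List.foldl_append_eq_flatMap]
  simp [pvSeg]

theorem pvInnerA (kg : List (Int × List (Int × Int))) (e : Int)
    (acc : List (Int × Int × Int)) :
    (match (PySem.Dict.mk kg).get? e with
     | none => acc ++ [(e, e, 185)]
     | some lst => lst.foldl (fun a tr =>
        if e ≠ tr.2 ∧ tr.1 ≠ 185 then a ++ [(e, tr.2, tr.1), (tr.2, e, tr.1)] else a)
        (acc ++ [(e, e, 185)])) = acc ++ pvSeg kg e := by
  rcases h : (PySem.Dict.mk kg).get? e with _ | lst
  · simp [pvSeg, PySem.Dict.getD_of_get?_eq_none _ _ h]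
  · have hg := PySem.Dict.getD_of_get?_eq_some (PySem.Dict.mk kg) ([] : List (Int × Int)) h
    simpa [hg] using pvInnerB kg e acc

theorem pvEntityLoopA (kg : List (Int × List (Int × Int))) (n_entity : Int)
    (acc : List (Int × Int × Int)) :
    (PySem.List.pyRange 0 n_entity 1).foldl (fun a e =>
      (match (PySem.Dict.mk kg).get? e with
       | none => a ++ [(e, e, 185)]
       | some lst => lst.foldl (fun a2 tr =>
          if e ≠ tr.2 ∧ tr.1 ≠ 185 then a2 ++ [(e, tr.2, tr.1), (tr.2, e, tr.1)] else a2)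
          (a ++ [(e, e, 185)]))) acc = acc ++ pvBase kg n_entity := by
  rw [PySem.List.foldl_congr_mem _ _ (fun a e => a ++ pvSeg kg e) _
      (by intro a e _; exact pvInnerA kg e a)]
  rw [PySem.List.foldl_append_eq_flatMap]
  rfl

theorem pvFlatMap_const {α : Type} (L : List α) (ys : List (Int × Int × Int)) :
    L.flatMap (fun _ => ys) = (List.replicate L.length ys).flatten := by
  induction L with
  | nil => simp
  | cons x t ih => simp [List.replicate_succ, ih]

theorem pvCount_flat (m : Nat) (ys : List Int) (r : Int) :
    ((List.replicate m ys).flatten).count r = m * ys.count r := by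
  induction m with
  | zero => simp
  | succ k ih => simp [List.replicate_succ, ih, Nat.succ_mul]; ring

theorem pvMap_flat (m : Nat) (ys : List (Int × Int × Int)) :
    ((List.replicate m ys).flatten).map (·.2.2) = (List.replicate m (ys.map (·.2.2))).flatten := by
  induction m with
  | zero => simp
  | succ k ih => simp [List.replicate_succ, ih]

theorem pvIdxF_stable (c : Int → Prop) [DecidablePred c] (l : List (Int × Int × Int))
    (d : PySem.Dict Int Int) (r : Int) (v : Int) (h : d.get? r = some v) :
    (pvIdxF c l d).get? r = some v := by
  induction l generalizing d with
  | nil => simpa [pvIdxF] using h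
  | cons p t ih =>
    simp only [pvIdxF, List.foldl_cons]
    split_ifs with hc
    · refine ih _ ?_
      rw [PySem.Dict.get?_insert_of_ne _ _ ?_]
      · exact h
      · intro he
        have hcr : d.contains r = true := by
          rw [PySem.Dict.contains_eq_isSome_get?, h]; rfl
        rw [he] at hcr
        exact hc.2 hcr
    · exact ih _ h

theorem pvIdxF_contains_mono (c : Int → Prop) [DecidablePred c] (l : List (Int × Int × Int))
    (d : PySem.Dict Int Int) (r : Int) (h : d.contains r = true) :
    (pvIdxF c l d).contains r = true := by
  rw [PySem.Dict.contains_eq_isSome_get?] at h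
  obtain ⟨v, hv⟩ := Option.isSome_iff_exists.mp h
  rw [PySem.Dict.contains_eq_isSome_get?, pvIdxF_stable c l d r v hv]; rfl

theorem pvIdxF_contains_of_mem (c : Int → Prop) [DecidablePred c] (l : List (Int × Int × Int))
    (d : PySem.Dict Int Int) (p : Int × Int × Int) (hp : p ∈ l) (hc : c p.2.2) :
    (pvIdxF c l d).contains p.2.2 = true := by
  induction l generalizing d with
  | nil => cases hp
  | cons q t ih =>
    simp only [pvIdxF, List.foldl_cons]
    rcases List.mem_cons.mp hp with rfl | hp'
    · split_ifs with hcond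
      · exact pvIdxF_contains_mono c t _ p.2.2 (PySem.Dict.contains_insert_self d p.2.2 _)
      · have hct : d.contains p.2.2 = true := by
          by_contra hno
          exact hcond ⟨hc, fun hcc => hno hcc⟩
        exact pvIdxF_contains_mono c t _ p.2.2 hct
    · exact ih _ hp'

theorem pvIdxF_contains_imp (c : Int → Prop) [DecidablePred c] (l : List (Int × Int × Int))
    (d : PySem.Dict Int Int) (r : Int) (h : (pvIdxF c l d).contains r = true) :
    d.contains r = true ∨ c r := by
  induction l generalizing d with
  | nil => exact Or.inl h
  | cons p t ih =>
    simp only [pvIdxF, List.foldl_cons] at h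
    split_ifs at h with hc
    · rcases ih _ h with hin | hcr
      · rw [PySem.Dict.contains_insert] at hin
        rcases (Bool.or_eq_true _ _).mp hin with heq | hold
        · exact Or.inr (by rw [show r = p.2.2 from by simpa using heq]; exact hc.1)
        · exact Or.inl hold
      · exact Or.inr hcr
    · exact ih _ h

theorem pvIdxF_sat (c : Int → Prop) [DecidablePred c] (l : List (Int × Int × Int))
    (d : PySem.Dict Int Int) (h : ∀ p ∈ l, c p.2.2 → d.contains p.2.2 = true) :
    pvIdxF c l d = d := by
  induction l with
  | nil => rfl
  | cons p t ih =>
    simp only [pvIdxF, List.foldl_cons]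
    rw [if_neg (by
      rintro ⟨hc, hnc⟩
      exact hnc (h p (List.mem_cons_self) hc))]
    exact ih (fun q hq hcq => h q (List.mem_cons_of_mem _ hq) hcq)

theorem pvIdxF_append (c : Int → Prop) [DecidablePred c] (l1 l2 : List (Int × Int × Int))
    (d : PySem.Dict Int Int) : pvIdxF c (l1 ++ l2) d = pvIdxF c l2 (pvIdxF c l1 d) := by
  simp [pvIdxF, List.foldl_append]

theorem pvIdxF_flat_sat (c : Int → Prop) [DecidablePred c] (base : List (Int × Int × Int))
    (k : Nat) (d : PySem.Dict Int Int)
    (h : ∀ p ∈ base, c p.2.2 → d.contains p.2.2 = true) :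
    pvIdxF c ((List.replicate k base).flatten) d = d := by
  induction k with
  | zero => rfl
  | succ n ih =>
    rw [List.replicate_succ, List.flatten_cons, pvIdxF_append, pvIdxF_sat c base d h]
    exact ih

theorem pvIdxF_rep_succ (c : Int → Prop) [DecidablePred c] (base : List (Int × Int × Int))
    (k : Nat) :
    pvIdxF c ((List.replicate (k + 1) base).flatten) PySem.Dict.empty
      = pvIdxF c base PySem.Dict.empty := by
  rw [List.replicate_succ, List.flatten_cons, pvIdxF_append]
  exact pvIdxF_flat_sat c base k _ (fun p hp hc => pvIdxF_contains_of_mem c base _ p hp hc)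

theorem pvFilt_flat (c : Int → Prop) [DecidablePred c] (D : PySem.Dict Int Int)
    (m : Nat) (base : List (Int × Int × Int)) :
    pvFilt c D ((List.replicate m base).flatten)
      = (List.replicate m (pvFilt c D base)).flatten := by
  induction m with
  | zero => rfl
  | succ k ih =>
    rw [List.replicate_succ, List.flatten_cons]
    simp only [pvFilt] at ih ⊢
    rw [List.filterMap_append, ih, List.replicate_succ, List.flatten_cons]

theorem pvIdxF_eq_pvIns (c : Int → Prop) [DecidablePred c] (l : List (Int × Int × Int))
    (d : PySem.Dict Int Int) : pvIdxF c l d = pvIns c (l.map (·.2.2)) d := by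
  simp [pvIdxF, pvIns, List.foldl_map]

theorem pvNew_mem (s : List Int) (l : List Int) (x : Int) :
    x ∈ pvNew s l ↔ x ∈ l ∧ x ∉ s := by
  induction l generalizing s with
  | nil => simp [pvNew]
  | cons r t ih =>
    by_cases hr : r ∈ s
    · simp only [pvNew, if_pos hr, ih]
      constructor
      · rintro ⟨hx, hs⟩; exact ⟨List.mem_cons_of_mem _ hx, hs⟩
      · rintro ⟨hx, hs⟩
        rcases List.mem_cons.mp hx with rfl | hx'
        · exact absurd hr hs
        · exact ⟨hx', hs⟩
    · simp only [pvNew, if_neg hr, List.mem_cons, ih, List.mem_cons]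
      constructor
      · rintro (rfl | ⟨hx, hs⟩)
        · exact ⟨Or.inl rfl, hr⟩
        · exact ⟨Or.inr hx, fun h => hs (Or.inr h)⟩
      · rintro ⟨rfl | hx, hs⟩
        · exact Or.inl rfl
        · by_cases hxr : x = r
          · exact Or.inl hxr
          · exact Or.inr ⟨hx, by rintro (h | h); exact hxr h; exact hs h⟩

theorem pvNew_nodup (s : List Int) (l : List Int) : (pvNew s l).Nodup := by
  induction l generalizing s with
  | nil => simp [pvNew]
  | cons r t ih =>
    by_cases hr : r ∈ s
    · simpa [pvNew, if_pos hr] using ih s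
    · rw [pvNew, if_neg hr]
      refine List.nodup_cons.mpr ⟨?_, ih (r :: s)⟩
      intro hmem
      exact ((pvNew_mem _ _ _).mp hmem).2 (List.mem_cons_self)

theorem pvNew_congr (l : List Int) (s s' : List Int) (h : ∀ x, x ∈ s ↔ x ∈ s') :
    pvNew s l = pvNew s' l := by
  induction l generalizing s s' with
  | nil => rfl
  | cons r t ih =>
    by_cases hr : r ∈ s
    · rw [pvNew, if_pos hr, pvNew, if_pos ((h r).mp hr)]
      exact ih s s' h
    · rw [pvNew, if_neg hr, pvNew, if_neg (fun hx => hr ((h r).mpr hx))]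
      exact congrArg (r :: ·) (ih (r :: s) (r :: s')
        (by intro x; simp only [List.mem_cons]; rw [h x]))

theorem pvNew_append (s : List Int) (l1 l2 : List Int) :
    pvNew s (l1 ++ l2) = pvNew s l1 ++ pvNew (pvNew s l1 ++ s) l2 := by
  induction l1 generalizing s with
  | nil => simp [pvNew]
  | cons r t ih =>
    by_cases hr : r ∈ s
    · rw [List.cons_append, pvNew, if_pos hr, pvNew, if_pos hr, ih]
    · rw [List.cons_append, pvNew, if_neg hr, pvNew, if_neg hr, ih, List.cons_append]
      refine congrArg _ (congrArg _ (pvNew_congr l2 _ _ ?_))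
      intro x
      simp only [List.mem_append, List.mem_cons]
      tauto

theorem pvNew_filter (s : List Int) (l : List Int) (a : Int) (ha : a ∈ s) :
    pvNew s l = pvNew s (l.filter (fun x => x ≠ a)) := by
  induction l generalizing s with
  | nil => rfl
  | cons r t ih =>
    by_cases hra : r = a
    · subst hra
      rw [List.filter_cons_of_neg (by simp), pvNew, if_pos ha]
      exact ih s ha
    · rw [List.filter_cons_of_pos (by simpa using hra)]
      by_cases hr : r ∈ s
      · rw [pvNew, if_pos hr, pvNew, if_pos hr]; exact ih s ha
      · rw [pvNew, if_neg hr, pvNew, if_neg hr]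
        exact congrArg _ (ih (r :: s) (List.mem_cons_of_mem _ ha))

theorem pvIns_pvNew (c : Int → Prop) [DecidablePred c] (l : List Int) (s : List Int)
    (d : PySem.Dict Int Int) (h : ∀ r, d.contains r = true ↔ (r ∈ s ∧ c r)) :
    pvIns c l d = pvIns c (pvNew s l) d := by
  induction l generalizing s d with
  | nil => rfl
  | cons r t ih =>
    by_cases hr : r ∈ s
    · have hstep : (if c r ∧ ¬ d.contains r = true then d.insert r (d.size : Int) else d) = d := by
        by_cases hc : c r
        · rw [if_neg]; rintro ⟨_, hn⟩; exact hn ((h r).mpr ⟨hr, hc⟩)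
        · rw [if_neg]; rintro ⟨hc', _⟩; exact hc hc'
      rw [pvNew, if_pos hr]
      show pvIns c t (if c r ∧ ¬ d.contains r = true then d.insert r (d.size : Int) else d)
          = pvIns c (pvNew s t) d
      rw [hstep]
      exact ih s d h
    · have hdc : d.contains r = false := by
        by_contra hx
        exact hr ((h r).mp (by simpa using hx)).1
      rw [pvNew, if_neg hr]
      show pvIns c t (if c r ∧ ¬ d.contains r = true then d.insert r (d.size : Int) else d)
          = pvIns c (pvNew (r :: s) t) (if c r ∧ ¬ d.contains r = true
              then d.insert r (d.size : Int) else d)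
      refine ih (r :: s) _ ?_
      intro x
      by_cases hc : c r
      · rw [if_pos ⟨hc, by simp [hdc]⟩, PySem.Dict.contains_insert]
        constructor
        · intro hx
          rcases (Bool.or_eq_true _ _).mp hx with hxe | hxd
          · have : x = r := by simpa using hxe
            exact ⟨by simp [this], by rwa [this]⟩
          · have := (h x).mp hxd
            exact ⟨List.mem_cons_of_mem _ this.1, this.2⟩
        · rintro ⟨hx, hcx⟩
          rcases List.mem_cons.mp hx with rfl | hx'
          · simp
          · simp [(h x).mpr ⟨hx', hcx⟩]
      · rw [if_neg (by rintro ⟨hc', _⟩; exact hc hc'), h x]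
        constructor
        · rintro ⟨hx, hcx⟩; exact ⟨List.mem_cons_of_mem _ hx, hcx⟩
        · rintro ⟨hx, hcx⟩
          rcases List.mem_cons.mp hx with rfl | hx'
          · exact absurd hcx hc
          · exact ⟨hx', hcx⟩

theorem pvIns_nodup (c : Int → Prop) [DecidablePred c] (l : List Int)
    (d : PySem.Dict Int Int) (hn : l.Nodup) (hd : ∀ r ∈ l, d.contains r = false) :
    pvIns c l d = l.foldl (fun ix r => if c r then ix.insert r (ix.size : Int) else ix) d := by
  induction l generalizing d with
  | nil => rfl
  | cons r t ih =>
    have hdr : d.contains r = false := hd r (List.mem_cons_self)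
    have hstep : (if c r ∧ ¬ d.contains r = true then d.insert r (d.size : Int) else d)
        = (if c r then d.insert r (d.size : Int) else d) := by
      by_cases hc : c r <;> simp [hc, hdr]
    show pvIns c t (if c r ∧ ¬ d.contains r = true then d.insert r (d.size : Int) else d)
        = List.foldl (fun ix r => if c r then ix.insert r (ix.size : Int) else ix) d (r :: t)
    rw [hstep, List.foldl_cons]
    refine ih _ (List.nodup_cons.mp hn).2 ?_
    intro x hx
    have hxr : x ≠ r := fun h => (List.nodup_cons.mp hn).1 (h ▸ hx)
    by_cases hc : c r
    · rw [if_pos hc, PySem.Dict.contains_insert]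
      simp [hxr, hd x (List.mem_cons_of_mem _ hx)]
    · rw [if_neg hc]; exact hd x (List.mem_cons_of_mem _ hx)

theorem pvSegER_ne (kg : List (Int × List (Int × Int))) (e : Int) (r : Int)
    (h : r ∈ pvSegER kg e) : r ≠ 185 := by
  simp only [pvSegER, List.mem_flatMap] at h
  obtain ⟨rt, _, hmem⟩ := h
  by_cases hq : e ≠ rt.2 ∧ rt.1 ≠ 185
  · rw [if_pos hq] at hmem
    rcases List.mem_cons.mp hmem with rfl | hmem'
    · exact hq.2
    · rcases List.mem_cons.mp hmem' with rfl | h'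
      · exact hq.2
      · cases h'
  · rw [if_neg hq] at hmem; cases hmem

-- relations of one hop's edges, as a flatMap
theorem pvSegRel (kg : List (Int × List (Int × Int))) (e : Int) :
    (pvSeg kg e).map (·.2.2) = 185 :: pvSegER kg e := by
  simp only [pvSeg, List.map_cons, List.map_flatMap, pvSegER]
  refine congrArg (List.cons 185)
    (congrArg (fun f => List.flatMap f ((PySem.Dict.mk kg).getD e []))
      (funext fun rt => ?_))
  by_cases hq : e ≠ rt.2 ∧ rt.1 ≠ 185 <;> simp [hq]

theorem pvRels (kg : List (Int × List (Int × Int))) (n_entity : Int) :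
    (pvBase kg n_entity).map (·.2.2)
      = (PySem.List.pyRange 0 n_entity 1).flatMap (fun e => 185 :: pvSegER kg e) := by
  rw [pvBase, List.map_flatMap]
  exact congrArg (fun f => List.flatMap f (PySem.List.pyRange 0 n_entity 1))
    (funext fun e => pvSegRel kg e)

theorem pvRels_count_185 (kg : List (Int × List (Int × Int))) (es : List Int) :
    (es.flatMap (fun e => 185 :: pvSegER kg e)).count 185 = es.length := by
  induction es with
  | nil => rfl
  | cons e t ih =>
    rw [List.flatMap_cons, List.count_append, ih, List.count_cons_self,
      List.count_eq_zero.mpr (fun h => pvSegER_ne kg e 185 h rfl)]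
    simp [Nat.add_comm]

theorem pvRels_count_ne (kg : List (Int × List (Int × Int))) (es : List Int) (r : Int)
    (hr : r ≠ 185) :
    (es.flatMap (fun e => 185 :: pvSegER kg e)).count r = (es.flatMap (pvSegER kg)).count r := by
  induction es with
  | nil => rfl
  | cons e t ih =>
    rw [List.flatMap_cons, List.flatMap_cons, List.count_append, List.count_append, ih]
    simp [List.count_cons]
    exact fun h => hr h.symm

theorem pvRels_filter (kg : List (Int × List (Int × Int))) (es : List Int) :
    (es.flatMap (fun e => 185 :: pvSegER kg e)).filter (fun x => x ≠ 185)
      = es.flatMap (pvSegER kg) := by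
  induction es with
  | nil => rfl
  | cons e t ih =>
    rw [List.flatMap_cons, List.flatMap_cons, List.filter_append, ih,
      List.filter_cons_of_neg (by simp)]
    refine congrArg (· ++ _) ?_
    exact List.filter_eq_self.mpr (fun a ha => by simpa using pvSegER_ne kg e a ha)

-- one step of B's tallying fold
def pvCStep (e : Int) (s : PySem.Dict Int Int × List Int) (rt : Int × Int) :
    PySem.Dict Int Int × List Int :=
  if e ≠ rt.2 ∧ rt.1 ≠ 185 then
    if s.1.contains rt.1 then (s.1.modify rt.1 0 (· + 2), s.2)
    else (s.1.insert rt.1 2, s.2 ++ [rt.1])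
  else s

theorem pvCntInner (n_entity e : Int) (lst : List (Int × Int)) (c : PySem.Dict Int Int)
    (o : List Int) (P : List Int)
    (h1 : ∀ r, c.getD r 0 = if r = 185 then n_entity else (P.count r : Int))
    (h2 : ∀ r, c.contains r = true ↔ (r = 185 ∨ r ∈ P)) :
    (∀ r, (lst.foldl (pvCStep e) (c, o)).1.getD r 0
        = if r = 185 then n_entity
          else (((P ++ lst.flatMap (fun rt => if e ≠ rt.2 ∧ rt.1 ≠ 185 then [rt.1, rt.1] else [])).count r : Int)))
    ∧ (∀ r, (lst.foldl (pvCStep e) (c, o)).1.contains r = true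
        ↔ (r = 185 ∨ r ∈ P ++ lst.flatMap (fun rt => if e ≠ rt.2 ∧ rt.1 ≠ 185 then [rt.1, rt.1] else [])))
    ∧ (lst.foldl (pvCStep e) (c, o)).2
        = o ++ pvNew (185 :: P) (lst.flatMap (fun rt => if e ≠ rt.2 ∧ rt.1 ≠ 185 then [rt.1, rt.1] else [])) := by
  induction lst generalizing c o P with
  | nil => exact ⟨by simpa using h1, by simpa using h2, by simp [pvNew]⟩
  | cons rt t ih =>
    rw [List.foldl_cons, List.flatMap_cons]
    by_cases hq : e ≠ rt.2 ∧ rt.1 ≠ 185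
    · rw [if_pos hq]
      by_cases hct : c.contains rt.1 = true
      · have hrP : rt.1 ∈ P := by
          rcases (h2 rt.1).mp hct with h185 | hP
          · exact absurd h185 hq.2
          · exact hP
        have hstep : pvCStep e (c, o) rt = (c.modify rt.1 0 (· + 2), o) := by
          rw [pvCStep, if_pos hq, if_pos hct]
        rw [hstep]
        have h1' : ∀ r, (c.modify rt.1 0 (· + 2)).getD r 0
            = if r = 185 then n_entity else (((P ++ [rt.1, rt.1]).count r : Int)) := by
          intro r
          rw [PySem.Dict.getD_modify]
          by_cases hre : r = rt.1
          · subst hre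
            rw [if_pos rfl, h1 rt.1, if_neg hq.2, if_neg hq.2, List.count_append]
            push_cast [List.count_cons]
            simp
          · rw [if_neg hre, h1 r, List.count_append]
            by_cases hr185 : r = 185
            · simp [hr185]
            · rw [if_neg hr185, if_neg hr185]
              have : ¬ (rt.1 = r) := fun h => hre h.symm
              simp [this]
        have h2' : ∀ r, (c.modify rt.1 0 (· + 2)).contains r = true
            ↔ (r = 185 ∨ r ∈ P ++ [rt.1, rt.1]) := by
          intro r
          rw [PySem.Dict.contains_modify]
          simp only [Bool.or_eq_true, beq_iff_eq, List.mem_append, List.mem_cons,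
            List.not_mem_nil, or_false]
          constructor
          · rintro (rfl | h)
            · exact Or.inr (Or.inl hrP)
            · rcases (h2 r).mp h with h185 | hP
              · exact Or.inl h185
              · exact Or.inr (Or.inl hP)
          · rintro (h185 | hP | rfl | rfl)
            · exact Or.inr ((h2 r).mpr (Or.inl h185))
            · exact Or.inr ((h2 r).mpr (Or.inr hP))
            · exact Or.inl rfl
            · exact Or.inl rfl
        obtain ⟨g1, g2, g3⟩ := ih (c.modify rt.1 0 (· + 2)) o (P ++ [rt.1, rt.1]) h1' h2'
        refine ⟨fun r => by rw [g1 r, List.append_assoc], fun r => by rw [g2 r, List.append_assoc],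
          ?_⟩
        rw [g3]
        have hseen : pvNew (185 :: (P ++ [rt.1, rt.1]))
            (t.flatMap (fun rt => if e ≠ rt.2 ∧ rt.1 ≠ 185 then [rt.1, rt.1] else []))
            = pvNew (185 :: P) (t.flatMap (fun rt => if e ≠ rt.2 ∧ rt.1 ≠ 185 then [rt.1, rt.1] else [])) := by
          refine pvNew_congr _ _ _ (fun x => ?_)
          simp only [List.mem_cons, List.mem_append, List.not_mem_nil]
          constructor
          · rintro (h | h | h)
            · exact Or.inl h
            · exact Or.inr h
            · rcases h with rfl | rfl | h
              · exact Or.inr hrP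
              · exact Or.inr hrP
              · cases h
          · rintro (h | h); exact Or.inl h; exact Or.inr (Or.inl h)
        rw [hseen]
        have hdrop : pvNew (185 :: P)
            ([rt.1, rt.1] ++ t.flatMap (fun rt => if e ≠ rt.2 ∧ rt.1 ≠ 185 then [rt.1, rt.1] else []))
            = pvNew (185 :: P) (t.flatMap (fun rt => if e ≠ rt.2 ∧ rt.1 ≠ 185 then [rt.1, rt.1] else [])) := by
          have hmem : rt.1 ∈ 185 :: P := List.mem_cons_of_mem _ hrP
          simp only [List.cons_append, List.nil_append]
          rw [pvNew, if_pos hmem, pvNew, if_pos hmem]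
        rw [hdrop]
      · have hnP : rt.1 ∉ P := fun hP => by
          have := (h2 rt.1).mpr (Or.inr hP); exact hct this
        have hstep : pvCStep e (c, o) rt = (c.insert rt.1 2, o ++ [rt.1]) := by
          rw [pvCStep, if_pos hq, if_neg (by simpa using hct)]
        rw [hstep]
        have h1' : ∀ r, (c.insert rt.1 2).getD r 0
            = if r = 185 then n_entity else (((P ++ [rt.1, rt.1]).count r : Int)) := by
          intro r
          by_cases hre : r = rt.1
          · subst hre
            rw [PySem.Dict.getD_insert_self, if_neg hq.2, List.count_append,
              List.count_eq_zero.mpr hnP]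
            simp
          · rw [PySem.Dict.getD_insert_of_ne _ _ _ hre, h1 r, List.count_append]
            by_cases hr185 : r = 185
            · simp [hr185]
            · rw [if_neg hr185, if_neg hr185]
              have : ¬ (rt.1 = r) := fun h => hre h.symm
              simp [this]
        have h2' : ∀ r, (c.insert rt.1 2).contains r = true
            ↔ (r = 185 ∨ r ∈ P ++ [rt.1, rt.1]) := by
          intro r
          rw [PySem.Dict.contains_insert]
          simp only [Bool.or_eq_true, beq_iff_eq, List.mem_append, List.mem_cons,
            List.not_mem_nil, or_false]
          constructor
          · rintro (rfl | h)
            · exact Or.inr (Or.inr (Or.inl rfl))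
            · rcases (h2 r).mp h with h185 | hP
              · exact Or.inl h185
              · exact Or.inr (Or.inl hP)
          · rintro (h185 | hP | rfl | rfl)
            · exact Or.inr ((h2 r).mpr (Or.inl h185))
            · exact Or.inr ((h2 r).mpr (Or.inr hP))
            · exact Or.inl rfl
            · exact Or.inl rfl
        obtain ⟨g1, g2, g3⟩ := ih (c.insert rt.1 2) (o ++ [rt.1]) (P ++ [rt.1, rt.1]) h1' h2'
        refine ⟨fun r => by rw [g1 r, List.append_assoc], fun r => by rw [g2 r, List.append_assoc],
          ?_⟩
        rw [g3]
        have hnew : pvNew (185 :: P)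
            ([rt.1, rt.1] ++ t.flatMap (fun rt => if e ≠ rt.2 ∧ rt.1 ≠ 185 then [rt.1, rt.1] else []))
            = rt.1 :: pvNew (185 :: (P ++ [rt.1, rt.1]))
                (t.flatMap (fun rt => if e ≠ rt.2 ∧ rt.1 ≠ 185 then [rt.1, rt.1] else [])) := by
          have hnmem : rt.1 ∉ (185 : Int) :: P := by
            intro h
            rcases List.mem_cons.mp h with h1 | h2
            · exact hq.2 h1
            · exact hnP h2
          simp only [List.cons_append, List.nil_append]
          rw [pvNew, if_neg hnmem, pvNew, if_pos (List.mem_cons_self)]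
          refine congrArg _ (pvNew_congr _ _ _ (fun x => ?_))
          simp only [List.mem_cons, List.mem_append, List.not_mem_nil]
          tauto
        rw [hnew]
        simp
    · rw [if_neg hq]
      have hstep : pvCStep e (c, o) rt = (c, o) := by rw [pvCStep, if_neg hq]
      rw [hstep]
      simpa using ih c o P h1 h2

theorem pvCntFold (kg : List (Int × List (Int × Int))) (n_entity : Int) (es : List Int)
    (c : PySem.Dict Int Int) (o : List Int) (P : List Int)
    (h1 : ∀ r, c.getD r 0 = if r = 185 then n_entity else (P.count r : Int))
    (h2 : ∀ r, c.contains r = true ↔ (r = 185 ∨ r ∈ P)) :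
    (∀ r, (es.foldl (fun s e => ((PySem.Dict.mk kg).getD e []).foldl (pvCStep e) s) (c, o)).1.getD r 0
        = if r = 185 then n_entity else (((P ++ es.flatMap (pvSegER kg)).count r : Int)))
    ∧ (∀ r, (es.foldl (fun s e => ((PySem.Dict.mk kg).getD e []).foldl (pvCStep e) s) (c, o)).1.contains r = true
        ↔ (r = 185 ∨ r ∈ P ++ es.flatMap (pvSegER kg)))
    ∧ (es.foldl (fun s e => ((PySem.Dict.mk kg).getD e []).foldl (pvCStep e) s) (c, o)).2
        = o ++ pvNew (185 :: P) (es.flatMap (pvSegER kg)) := by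
  induction es generalizing c o P with
  | nil => exact ⟨by simpa using h1, by simpa using h2, by simp [pvNew]⟩
  | cons e t ih =>
    rw [List.foldl_cons, List.flatMap_cons]
    have hinner := pvCntInner n_entity e ((PySem.Dict.mk kg).getD e []) c o P h1 h2
    obtain ⟨i1, i2, i3⟩ := hinner
    have hQ : ((PySem.Dict.mk kg).getD e []).flatMap
        (fun rt => if e ≠ rt.2 ∧ rt.1 ≠ 185 then [rt.1, rt.1] else []) = pvSegER kg e := rfl
    rw [hQ] at i1 i2 i3
    obtain ⟨g1, g2, g3⟩ := ih
      (((PySem.Dict.mk kg).getD e []).foldl (pvCStep e) (c, o)).1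
      (((PySem.Dict.mk kg).getD e []).foldl (pvCStep e) (c, o)).2
      (P ++ pvSegER kg e) i1 i2
    refine ⟨fun r => by rw [g1 r, List.append_assoc], fun r => by rw [g2 r, List.append_assoc], ?_⟩
    rw [g3, i3, List.append_assoc]
    refine congrArg (o ++ ·) ?_
    rw [pvNew_append]
    refine congrArg _ (pvNew_congr _ _ _ (fun x => ?_))
    simp only [List.mem_append, List.mem_cons, pvNew_mem]
    tauto

theorem pvFilt_flatMap (c : Int → Prop) [DecidablePred c] (D : PySem.Dict Int Int)
    {α : Type} (es : List α) (f : α → List (Int × Int × Int)) :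
    pvFilt c D (es.flatMap f) = es.flatMap (fun e => pvFilt c D (f e)) := by
  induction es with
  | nil => rfl
  | cons e t ih =>
    rw [List.flatMap_cons, List.flatMap_cons, ← ih]
    simp only [pvFilt, List.filterMap_append]

theorem pvEmitInner (c : Int → Prop) [DecidablePred c] (idx : PySem.Dict Int Int)
    (e : Int) (lst : List (Int × Int)) (acc : List (Int × Int × Int))
    (h : ∀ rt ∈ lst, (e ≠ rt.2 ∧ rt.1 ≠ 185) → (idx.contains rt.1 = true ↔ c rt.1)) :
    lst.foldl (fun acc rt =>
      if e ≠ rt.2 ∧ rt.1 ≠ 185 then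
        match idx.get? rt.1 with
        | some i => acc ++ [(e, rt.2, i), (rt.2, e, i)]
        | none => acc
      else acc) acc
    = acc ++ pvFilt c idx (lst.flatMap (fun rt =>
        if e ≠ rt.2 ∧ rt.1 ≠ 185 then [(e, rt.2, rt.1), (rt.2, e, rt.1)] else [])) := by
  induction lst generalizing acc with
  | nil => simp [pvFilt]
  | cons rt t ih =>
    rw [List.foldl_cons, List.flatMap_cons]
    have hrest := fun acc' => ih acc' (fun q hq => h q (List.mem_cons_of_mem _ hq))
    by_cases hq : e ≠ rt.2 ∧ rt.1 ≠ 185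
    · rw [if_pos hq]
      have hiff := h rt (List.mem_cons_self) hq
      by_cases hc : c rt.1
      · have hcont : idx.contains rt.1 = true := hiff.mpr hc
        rw [PySem.Dict.contains_eq_isSome_get?] at hcont
        obtain ⟨i, hi⟩ := Option.isSome_iff_exists.mp hcont
        rw [hi]
        rw [hrest _]
        rw [if_pos hq]
        simp only [pvFilt, List.filterMap_append, List.filterMap_cons, if_pos hc, hi]
        simp
      · have hcont : idx.contains rt.1 = false := by
          by_contra hx
          exact hc (hiff.mp (by simpa using hx))
        have hnone : idx.get? rt.1 = none := by
          rw [PySem.Dict.contains_eq_isSome_get?] at hcont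
          exact Option.not_isSome_iff_eq_none.mp (by simp [hcont])
        rw [hnone, hrest _, if_pos hq]
        simp only [pvFilt, List.filterMap_append, List.filterMap_cons, if_neg hc]
        simp
    · rw [if_neg hq, hrest _, if_neg hq]
      simp [pvFilt]

theorem pvEmitSeg (c : Int → Prop) [DecidablePred c] (idx : PySem.Dict Int Int)
    (kg : List (Int × List (Int × Int))) (e : Int) (acc : List (Int × Int × Int))
    (h185 : idx.contains 185 = true ↔ c 185)
    (h : ∀ rt ∈ (PySem.Dict.mk kg).getD e [], (e ≠ rt.2 ∧ rt.1 ≠ 185) →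
        (idx.contains rt.1 = true ↔ c rt.1)) :
    ((PySem.Dict.mk kg).getD e []).foldl (fun acc rt =>
      if e ≠ rt.2 ∧ rt.1 ≠ 185 then
        match idx.get? rt.1 with
        | some i => acc ++ [(e, rt.2, i), (rt.2, e, i)]
        | none => acc
      else acc)
      (match idx.get? 185 with
       | some i => acc ++ [(e, e, i)]
       | none => acc)
    = acc ++ pvFilt c idx (pvSeg kg e) := by
  have hseg : pvFilt c idx (pvSeg kg e)
      = (if c 185 then [((e : Int), (e : Int), (idx.get? 185).getD 0)] else [])
        ++ pvFilt c idx (((PySem.Dict.mk kg).getD e []).flatMap (fun rt =>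
            if e ≠ rt.2 ∧ rt.1 ≠ 185 then [(e, rt.2, rt.1), (rt.2, e, rt.1)] else [])) := by
    rw [pvSeg]
    simp only [pvFilt, List.filterMap_cons]
    by_cases hc : c (185 : Int) <;> simp [hc]
  rw [hseg]
  by_cases hc : c (185 : Int)
  · have hcont : idx.contains 185 = true := h185.mpr hc
    rw [PySem.Dict.contains_eq_isSome_get?] at hcont
    obtain ⟨i, hi⟩ := Option.isSome_iff_exists.mp hcont
    rw [hi, pvEmitInner c idx e _ _ h, if_pos hc]
    simp
  · have hcont : idx.contains 185 = false := by
      by_contra hx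
      exact hc (h185.mp (by simpa using hx))
    have hnone : idx.get? (185 : Int) = none := by
      rw [PySem.Dict.contains_eq_isSome_get?] at hcont
      exact Option.not_isSome_iff_eq_none.mp (by simp [hcont])
    rw [hnone, pvEmitInner c idx e _ _ h, if_neg hc]
    simp

theorem pvMemBase (kg : List (Int × List (Int × Int))) (n_entity e : Int)
    (he : e ∈ PySem.List.pyRange 0 n_entity 1) (rt : Int × Int)
    (hrt : rt ∈ (PySem.Dict.mk kg).getD e []) (hq : e ≠ rt.2 ∧ rt.1 ≠ 185) :
    (e, rt.2, rt.1) ∈ pvBase kg n_entity := by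
  rw [pvBase, List.mem_flatMap]
  refine ⟨e, he, ?_⟩
  rw [pvSeg]
  refine List.mem_cons_of_mem _ ?_
  rw [List.mem_flatMap]
  exact ⟨rt, hrt, by rw [if_pos hq]; exact List.mem_cons_self⟩

theorem pvMemBase185 (kg : List (Int × List (Int × Int))) (n_entity e : Int)
    (he : e ∈ PySem.List.pyRange 0 n_entity 1) :
    (e, e, (185 : Int)) ∈ pvBase kg n_entity := by
  rw [pvBase, List.mem_flatMap]
  exact ⟨e, he, by rw [pvSeg]; exact List.mem_cons_self⟩

-- ===== VERDICT (by name: the statement is the Claim_ definition above) =====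
theorem edge_list_py_spec : Claim_equal_edge_list_py := by
  intro kg n_entity hop cnt_threshold _
  unfold Spec_edge_list_py
  by_cases hhop : hop ≤ 0
  · simp [edge_list_py, edge_list_py_alt, PySem.List.pyRange_one_eq_nil hhop, hhop,
      PySem.Dict.size_empty]
  · rw [not_le] at hhop
    by_cases hn : n_entity ≤ 0
    · simp [edge_list_py, edge_list_py_alt, PySem.List.pyRange_one_eq_nil hn, hn,
        PySem.Dict.size_empty]
    · rw [not_le] at hn
      obtain ⟨k, hk⟩ : ∃ k : Nat, hop.toNat = k + 1 :=
        Nat.exists_eq_succ_of_ne_zero (by omega)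
      simp only [edge_list_py, edge_list_py_alt,
        if_neg (show ¬ (hop ≤ 0 ∨ n_entity ≤ 0) by exact not_or_intro (not_le.mpr hhop) (not_le.mpr hn))]
      have hEl : (PySem.List.pyRange 0 hop 1).foldl (fun acc _h =>
          (PySem.List.pyRange 0 n_entity 1).foldl (fun acc e =>
            match (PySem.Dict.mk kg).get? e with
            | none => acc ++ [(e, e, 185)]
            | some lst => lst.foldl (fun acc tr =>
                if e ≠ tr.2 ∧ tr.1 ≠ 185 then acc ++ [(e, tr.2, tr.1), (tr.2, e, tr.1)] else acc)
                (acc ++ [(e, e, 185)])) acc) []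
          = (List.replicate hop.toNat (pvBase kg n_entity)).flatten := by
        rw [PySem.List.foldl_congr_mem _ _ (fun acc _ => acc ++ pvBase kg n_entity) _
            (by intro acc h _; exact pvEntityLoopA kg n_entity acc)]
        rw [PySem.List.foldl_append_eq_flatMap, pvFlatMap_const]
        simp [PySem.List.length_pyRange_one]
      rw [hEl]
      set base := pvBase kg n_entity with hbase
      set F := (List.replicate hop.toNat base).flatten with hF
      have hcnt : ∀ r : Int,
          (F.foldl (fun c p => c.modify p.2.2 0 (· + 1)) PySem.Dict.empty).getD r 0
            = hop * ((base.map (fun p => p.2.2)).count r : Int) := by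
        intro r
        rw [← List.foldl_map (f := fun p : Int × Int × Int => p.2.2)
             (g := fun c r => PySem.Dict.modify c r 0 (· + 1))]
        rw [PySem.Dict.getD_foldl_modify_add_one, hF, pvMap_flat, pvCount_flat]
        simp
        exact Or.inl hhop.le
      simp only [hcnt]
      have hidxA :
          F.foldl (fun ix p =>
            if hop * ((base.map (fun p => p.2.2)).count p.2.2 : Int) > cnt_threshold ∧ ¬ ix.contains p.2.2
            then ix.insert p.2.2 (ix.size : Int) else ix) PySem.Dict.empty
          = (pvIdxF (fun r => hop * ((base.map (fun p => p.2.2)).count r : Int) > cnt_threshold) base PySem.Dict.empty) := by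
        have h1 : F.foldl (fun ix p =>
            if hop * ((base.map (fun p => p.2.2)).count p.2.2 : Int) > cnt_threshold ∧ ¬ ix.contains p.2.2
            then ix.insert p.2.2 (ix.size : Int) else ix) PySem.Dict.empty
            = pvIdxF (fun r => hop * ((base.map (fun p => p.2.2)).count r : Int) > cnt_threshold) F PySem.Dict.empty := rfl
        rw [h1, hF, hk]
        exact pvIdxF_rep_succ _ base k
      rw [hidxA]
      have hfiltA :
          F.filterMap (fun p =>
            if hop * ((base.map (fun p => p.2.2)).count p.2.2 : Int) > cnt_threshold
            then some (p.1, p.2.1, (((pvIdxF (fun r => hop * ((base.map (fun p => p.2.2)).count r : Int) > cnt_threshold) base PySem.Dict.empty)).get? p.2.2).getD 0) else none)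
          = (List.replicate hop.toNat
              (pvFilt (fun r => hop * ((base.map (fun p => p.2.2)).count r : Int) > cnt_threshold) (pvIdxF (fun r => hop * ((base.map (fun p => p.2.2)).count r : Int) > cnt_threshold) base PySem.Dict.empty) base)).flatten := by
        have h1 : F.filterMap (fun p =>
            if hop * ((base.map (fun p => p.2.2)).count p.2.2 : Int) > cnt_threshold
            then some (p.1, p.2.1, (((pvIdxF (fun r => hop * ((base.map (fun p => p.2.2)).count r : Int) > cnt_threshold) base PySem.Dict.empty)).get? p.2.2).getD 0) else none)
            = pvFilt (fun r => hop * ((base.map (fun p => p.2.2)).count r : Int) > cnt_threshold) (pvIdxF (fun r => hop * ((base.map (fun p => p.2.2)).count r : Int) > cnt_threshold) base PySem.Dict.empty) F := rfl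
        rw [h1, hF, pvFilt_flat]
      rw [hfiltA]
      -- ===== B side =====
      have hfix : (PySem.List.pyRange 0 n_entity 1).foldl (fun (s : PySem.Dict Int Int × List Int) e =>
            ((PySem.Dict.mk kg).getD e []).foldl (fun s rt =>
              if e ≠ rt.2 ∧ rt.1 ≠ 185 then
                if s.1.contains rt.1 then (s.1.modify rt.1 0 (· + 2), s.2)
                else (s.1.insert rt.1 2, s.2 ++ [rt.1])
              else s) s)
            ((PySem.Dict.empty.insert 185 n_entity), [185])
          = (PySem.List.pyRange 0 n_entity 1).foldl (fun s e =>
              ((PySem.Dict.mk kg).getD e []).foldl (pvCStep e) s)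
            ((PySem.Dict.empty.insert 185 n_entity), [185]) := rfl
      rw [hfix]
      have hc0 : ∀ r : Int, (PySem.Dict.empty.insert 185 n_entity).getD r 0
          = if r = 185 then n_entity else ((([] : List Int).count r : Int)) := by
        intro r
        by_cases h : r = 185
        · subst h; rw [PySem.Dict.getD_insert_self, if_pos rfl]
        · rw [PySem.Dict.getD_insert_of_ne _ _ _ h, PySem.Dict.getD_empty, if_neg h]; simp
      have hc2 : ∀ r : Int, (PySem.Dict.empty.insert 185 n_entity).contains r = true
          ↔ (r = 185 ∨ r ∈ ([] : List Int)) := by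
        intro r
        rw [PySem.Dict.contains_insert]
        simp [PySem.Dict.contains_empty]
      obtain ⟨k1, k2, k3⟩ := pvCntFold kg n_entity (PySem.List.pyRange 0 n_entity 1)
        (PySem.Dict.empty.insert 185 n_entity) [185] [] hc0 hc2
      simp only [List.nil_append] at k1 k2 k3
      set S := (PySem.List.pyRange 0 n_entity 1).foldl (fun s e =>
          ((PySem.Dict.mk kg).getD e []).foldl (pvCStep e) s)
        ((PySem.Dict.empty.insert 185 n_entity), [185]) with hS
      set ER := (PySem.List.pyRange 0 n_entity 1).flatMap (pvSegER kg) with hER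
      have hrels : base.map (fun p => p.2.2)
          = (PySem.List.pyRange 0 n_entity 1).flatMap (fun e => 185 :: pvSegER kg e) :=
        pvRels kg n_entity
      have hcnt185 : ((base.map (fun p => p.2.2)).count 185 : Int) = n_entity := by
        rw [hrels, pvRels_count_185, PySem.List.length_pyRange_one]
        omega
      have hcntne : ∀ r : Int, r ≠ 185 →
          ((base.map (fun p => p.2.2)).count r : Int) = (ER.count r : Int) := by
        intro r hrne
        rw [hrels, pvRels_count_ne kg _ r hrne, hER]
      have hval : ∀ r ∈ ((185 : Int) :: pvNew [185] ER),
          S.1.getD r 0 = ((base.map (fun p => p.2.2)).count r : Int) := by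
        intro r hr
        rcases List.mem_cons.mp hr with rfl | hr'
        · rw [k1 185, if_pos rfl, hcnt185]
        · have hmem := (pvNew_mem _ _ _).mp hr'
          have hrne : r ≠ 185 := by
            intro h; exact hmem.2 (by simp [h])
          rw [k1 r, if_neg hrne, hcntne r hrne, hER]
      have hk3 : S.2 = (185 : Int) :: pvNew [185] ER := by
        rw [k3]; rfl
      have horder : ((185 : Int) :: pvNew [185] ER)
          = pvNew [] ((PySem.List.pyRange 0 n_entity 1).flatMap (fun e => 185 :: pvSegER kg e)) := by
        rw [PySem.List.pyRange_one_cons (show (0:Int) < n_entity from hn), List.flatMap_cons,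
          List.cons_append, pvNew, if_neg (List.not_mem_nil)]
        refine congrArg _ ?_
        conv_rhs => rw [pvNew_filter [185] _ 185 (List.mem_cons_self)]
        rw [List.filter_append,
          List.filter_eq_self.mpr (fun a ha => by simpa using pvSegER_ne kg 0 a ha),
          pvRels_filter kg _]
        rw [hER, PySem.List.pyRange_one_cons (show (0:Int) < n_entity from hn), List.flatMap_cons]
      have hidxB : ((185 : Int) :: pvNew [185] ER).foldl (fun ix r =>
            if hop * S.1.getD r 0 > cnt_threshold then ix.insert r (ix.size : Int) else ix)
            PySem.Dict.empty
          = pvIdxF (fun r => hop * ((base.map (fun p => p.2.2)).count r : Int) > cnt_threshold)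
              base PySem.Dict.empty := by
        rw [PySem.List.foldl_congr_mem _ _ (fun ix r =>
            if hop * ((base.map (fun p => p.2.2)).count r : Int) > cnt_threshold
            then ix.insert r (ix.size : Int) else ix) _
            (by intro ix r hrmem; rw [hval r hrmem])]
        rw [← pvIns_nodup _ _ _ ?hnd ?hemp]
        case hnd =>
          refine List.nodup_cons.mpr ⟨?_, pvNew_nodup _ _⟩
          intro hmem
          exact ((pvNew_mem _ _ _).mp hmem).2 (List.mem_cons_self)
        case hemp =>
          intro r _
          exact PySem.Dict.contains_empty r
        rw [horder]
        rw [← pvIns_pvNew _ _ [] PySem.Dict.empty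
            (by intro r; simp [PySem.Dict.contains_empty])]
        rw [pvIdxF_eq_pvIns, hrels]
      have hDc : ∀ r : Int, (∃ p ∈ base, p.2.2 = r) →
          ((pvIdxF (fun r => hop * ((base.map (fun p => p.2.2)).count r : Int) > cnt_threshold)
              base PySem.Dict.empty).contains r = true
            ↔ hop * ((base.map (fun p => p.2.2)).count r : Int) > cnt_threshold) := by
        intro r hmem
        constructor
        · intro h
          rcases pvIdxF_contains_imp _ _ _ _ h with hd | hc
          · rw [PySem.Dict.contains_empty] at hd; cases hd
          · exact hc
        · intro hc
          obtain ⟨p, hp, hpr⟩ := hmem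
          have := pvIdxF_contains_of_mem (fun r => hop * ((base.map (fun p => p.2.2)).count r : Int) > cnt_threshold)
            base PySem.Dict.empty p hp (by rwa [hpr])
          rwa [hpr] at this
      rw [hk3, hidxB]
      have hout : (PySem.List.pyRange 0 n_entity 1).foldl (fun acc e =>
            ((PySem.Dict.mk kg).getD e []).foldl (fun acc rt =>
              if e ≠ rt.2 ∧ rt.1 ≠ 185 then
                match (pvIdxF (fun r => hop * ((base.map (fun p => p.2.2)).count r : Int) > cnt_threshold)
                    base PySem.Dict.empty).get? rt.1 with
                | some i => acc ++ [(e, rt.2, i), (rt.2, e, i)]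
                | none => acc
              else acc)
            (match (pvIdxF (fun r => hop * ((base.map (fun p => p.2.2)).count r : Int) > cnt_threshold)
                base PySem.Dict.empty).get? 185 with
             | some i => acc ++ [(e, e, i)]
             | none => acc)) []
          = pvFilt (fun r => hop * ((base.map (fun p => p.2.2)).count r : Int) > cnt_threshold)
              (pvIdxF (fun r => hop * ((base.map (fun p => p.2.2)).count r : Int) > cnt_threshold)
                base PySem.Dict.empty) base := by
        rw [PySem.List.foldl_congr_mem _ _ (fun acc e => acc ++
            pvFilt (fun r => hop * ((base.map (fun p => p.2.2)).count r : Int) > cnt_threshold)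
              (pvIdxF (fun r => hop * ((base.map (fun p => p.2.2)).count r : Int) > cnt_threshold)
                base PySem.Dict.empty) (pvSeg kg e)) _ ?hcong]
        case hcong =>
          intro acc e he
          refine pvEmitSeg _ _ kg e acc ?_ ?_
          · exact hDc 185 ⟨(e, e, 185), pvMemBase185 kg n_entity e he, rfl⟩
          · intro rt hrt hq
            exact hDc rt.1 ⟨(e, rt.2, rt.1), pvMemBase kg n_entity e he rt hrt hq, rfl⟩
        rw [PySem.List.foldl_append_eq_flatMap, ← pvFilt_flatMap]
        rw [List.nil_append, hbase]
        rfl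
      rw [hout]
      simp [PySem.List.pyRepeat]
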